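-- pv_equiv track=rewrite | github.com/pavelm/Broad-Institute-MBTA | problem_3/problem3.py | get_line_dict
-- ===== SOURCE A (Python) =====
-- def get_line_dict(connecting_stops, route_stops):
--
--     line_dict = {}
--
--     # create dictionary, each key is the route id and each value is the list of lines connected to it
--     for route_id in route_stops.keys():
--         line_dict[route_id] = []
--
--         # for each connecting_stop list
--         for connecting_stops_lists in connecting_stops.values():
--
--             # if the route_id is in the list, we want to add all of the lines except for the id
--             if route_id in connecting_stops_lists:
--
--                 for stop in connecting_stops_lists:
--
--                     if stop != route_id and stop not in line_dict[route_id]: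
--                         line_dict[route_id].append(stop)
--
--     return line_dict
-- ===== SOURCE B (Python) =====
-- def get_line_dict(connecting_stops, route_stops):
--     # Two staged passes: build a stop -> concatenated-connecting-lists index,
--     # then per route dedup with dict.fromkeys and drop the route itself.
--     collected = {}
--     for lst in connecting_stops.values():
--         for member in dict.fromkeys(lst):
--             collected.setdefault(member, []).extend(lst)
--     return {rid: [s for s in dict.fromkeys(collected.get(rid, [])) if s != rid]
--             for rid in route_stops}
-- ===== Notes on version B (the rewrite author's own statement) =====
-- stated objective: faster
-- what changed: Replaced A's per-route rescan of every connecting list (with an inner 'not in bucket' membership scan) by two staged passes: build a stop-to-concatenated-lists index once, then produce each route's value by an ordered dict.fromkeys dedup with the route itself filtered out.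
import Mathlib
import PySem

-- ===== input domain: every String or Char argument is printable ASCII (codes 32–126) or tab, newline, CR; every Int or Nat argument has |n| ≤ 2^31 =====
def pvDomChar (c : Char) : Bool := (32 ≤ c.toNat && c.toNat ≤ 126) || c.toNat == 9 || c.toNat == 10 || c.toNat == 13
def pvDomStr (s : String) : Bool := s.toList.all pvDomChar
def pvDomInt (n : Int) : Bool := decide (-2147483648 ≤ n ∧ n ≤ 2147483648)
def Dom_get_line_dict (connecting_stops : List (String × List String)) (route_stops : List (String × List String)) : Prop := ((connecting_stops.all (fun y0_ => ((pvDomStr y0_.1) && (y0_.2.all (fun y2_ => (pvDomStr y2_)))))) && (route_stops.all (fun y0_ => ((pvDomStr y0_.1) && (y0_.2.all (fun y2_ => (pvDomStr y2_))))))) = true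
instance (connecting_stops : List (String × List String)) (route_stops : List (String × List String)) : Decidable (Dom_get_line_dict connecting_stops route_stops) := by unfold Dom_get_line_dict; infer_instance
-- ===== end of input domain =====

-- B replaces A's route-by-route rescan of the connecting lists by two staged passes: build a
-- stop → concatenated-connecting-lists index once, then per route dedup (dict.fromkeys) and
-- drop the route itself (objective: faster — the per-route scan of all lists disappears).

-- ===== PORT A =====
-- A's innermost loop: 'for stop in lst: if stop != r and stop not in line_dict[r]: line_dict[r].append(stop)'
def pvAddStep (r : String) (d : PySem.Dict String (List String)) (stop : String) : PySem.Dict String (List String) :=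
  if stop != r && !((d.getD r []).contains stop) then d.modify r [] (· ++ [stop]) else d

def get_line_dict (connecting_stops : List (String × List String)) (route_stops : List (String × List String)) : List (String × List String) :=
  let csD := PySem.Dict.ofList connecting_stops
  let rsD := PySem.Dict.ofList route_stops
  let line_dict : PySem.Dict String (List String) :=
    rsD.keys.foldl (fun d route_id =>
      csD.values.foldl (fun d lst =>
        if lst.contains route_id then lst.foldl (pvAddStep route_id) d else d)
        (d.insert route_id []))
      PySem.Dict.empty
  line_dict.items

-- ===== PORT B =====
def get_line_dict_alt (connecting_stops : List (String × List String)) (route_stops : List (String × List String)) : List (String × List String) :=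
  let csD := PySem.Dict.ofList connecting_stops
  let rsD := PySem.Dict.ofList route_stops
  -- stage 1: collected[member] += lst, once per distinct member of each connecting list
  let collected : PySem.Dict String (List String) :=
    csD.values.foldl (fun d lst =>
      (PySem.List.dedup lst).foldl (fun d member => d.modify member [] (· ++ lst)) d)
      PySem.Dict.empty
  -- stage 2: {rid: [s for s in dict.fromkeys(collected.get(rid, [])) if s != rid] for rid in route_stops}
  (rsD.keys.foldl (fun out rid =>
      out.insert rid ((PySem.List.dedup (collected.getD rid [])).filter (fun s => s != rid)))
    PySem.Dict.empty).items

-- ===== PRECONDITION & SPEC =====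
def Spec_get_line_dict (connecting_stops : List (String × List String)) (route_stops : List (String × List String)) (out : List (String × List String)) : Prop := out = get_line_dict_alt connecting_stops route_stops
instance (connecting_stops : List (String × List String)) (route_stops : List (String × List String)) (out : List (String × List String)) : Decidable (Spec_get_line_dict connecting_stops route_stops out) := by unfold Spec_get_line_dict; infer_instance

-- ===== CLAIM (what is proved, stated in full; the proofs are below) =====
def Claim_equal_get_line_dict : Prop := ∀ (connecting_stops : List (String × List String)) (route_stops : List (String × List String)), Dom_get_line_dict connecting_stops route_stops → Spec_get_line_dict connecting_stops route_stops (get_line_dict connecting_stops route_stops)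

-- ===== LEMMAS AND PROOFS =====

-- value-level picture of A's innermost loop
def addAll (r : String) (acc lst : List String) : List String :=
  lst.foldl (fun a s => if s != r && !(a.contains s) then a ++ [s] else a) acc

-- value A's bucket of route r ends up with
def valR (vals : List (List String)) (r : String) : List String :=
  vals.foldl (fun acc lst => if lst.contains r then addAll r acc lst else acc) []

theorem addAll_cons (r : String) (a : List String) (s : String) (t : List String) :
    addAll r a (s :: t) = addAll r (if s != r && !(a.contains s) then a ++ [s] else a) t := rfl

theorem addAll_append (r : String) (a l1 l2 : List String) :
    addAll r a (l1 ++ l2) = addAll r (addAll r a l1) l2 := List.foldl_append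

-- the innermost dict loop of A only touches key r, and does addAll there
theorem getD_addFold (r : String) (lst : List String) (d : PySem.Dict String (List String)) (k : String) :
    (lst.foldl (pvAddStep r) d).getD k [] =
      if k = r then addAll r (d.getD r []) lst else d.getD k [] := by
  induction lst generalizing d with
  | nil =>
    simp only [List.foldl_nil]
    split
    · rename_i h; subst h; rfl
    · rfl
  | cons s t ih =>
    simp only [List.foldl_cons]
    rw [ih]
    have hstep_r : (pvAddStep r d s).getD r [] =
        (if s != r && !((d.getD r []).contains s) then d.getD r [] ++ [s] else d.getD r []) := by
      unfold pvAddStep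
      split
      · rw [PySem.Dict.getD_modify_self]
      · rfl
    by_cases hk : k = r
    · subst hk
      rw [if_pos rfl, if_pos rfl, hstep_r, addAll_cons]
    · rw [if_neg hk, if_neg hk]
      unfold pvAddStep
      split
      · rw [PySem.Dict.getD_modify_of_ne _ _ _ hk]
      · rfl

theorem keys_addFold (r : String) (lst : List String) (d : PySem.Dict String (List String))
    (h : d.contains r = true) : (lst.foldl (pvAddStep r) d).keys = d.keys := by
  induction lst generalizing d with
  | nil => rfl
  | cons s t ih =>
    simp only [List.foldl_cons]
    have hkeys : (pvAddStep r d s).keys = d.keys := by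
      unfold pvAddStep
      split
      · rw [PySem.Dict.keys_modify, PySem.Dict.keys_insert_of_contains _ _ h]
      · rfl
    have hc : (pvAddStep r d s).contains r = true := by
      rw [PySem.Dict.contains_eq_decide_mem_keys, hkeys,
        ← PySem.Dict.contains_eq_decide_mem_keys, h]
    rw [ih _ hc, hkeys]

theorem contains_addFold (r x : String) (lst : List String) (d : PySem.Dict String (List String))
    (h : d.contains r = true) : (lst.foldl (pvAddStep r) d).contains x = d.contains x := by
  rw [PySem.Dict.contains_eq_decide_mem_keys, keys_addFold r lst d h,
    ← PySem.Dict.contains_eq_decide_mem_keys]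

-- === A side ===

def routeStepA (vals : List (List String)) (d : PySem.Dict String (List String)) (r : String) :
    PySem.Dict String (List String) :=
  vals.foldl (fun d lst => if lst.contains r then lst.foldl (pvAddStep r) d else d) (d.insert r [])

theorem valsFold_getD (vals : List (List String)) (r : String)
    (d : PySem.Dict String (List String)) (k : String) :
    (vals.foldl (fun d lst => if lst.contains r then lst.foldl (pvAddStep r) d else d) d).getD k [] =
      if k = r then vals.foldl (fun acc lst => if lst.contains r then addAll r acc lst else acc) (d.getD r [])
      else d.getD k [] := by
  induction vals generalizing d with
  | nil =>
    simp only [List.foldl_nil]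
    split
    · rename_i h; subst h; rfl
    · rfl
  | cons v t ih =>
    simp only [List.foldl_cons]
    rw [ih]
    by_cases hk : k = r
    · subst hk
      rw [if_pos rfl, if_pos rfl]
      congr 1
      split
      · rw [getD_addFold, if_pos rfl]
      · rfl
    · rw [if_neg hk, if_neg hk]
      split
      · rw [getD_addFold, if_neg hk]
      · rfl

theorem valsFold_keys (vals : List (List String)) (r : String)
    (d : PySem.Dict String (List String)) (h : d.contains r = true) :
    (vals.foldl (fun d lst => if lst.contains r then lst.foldl (pvAddStep r) d else d) d).keys = d.keys := by
  induction vals generalizing d with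
  | nil => rfl
  | cons v t ih =>
    simp only [List.foldl_cons]
    by_cases hv : v.contains r = true
    · rw [if_pos hv]
      have hc := contains_addFold r r v d h
      rw [h] at hc
      rw [ih _ hc, keys_addFold r v d h]
    · simp only [Bool.not_eq_true] at hv
      rw [hv]
      simp only [Bool.false_eq_true, if_false]
      exact ih d h

theorem routeStepA_keys (vals : List (List String)) (d : PySem.Dict String (List String)) (r : String)
    (h : d.contains r = false) : (routeStepA vals d r).keys = d.keys ++ [r] := by
  unfold routeStepA
  rw [valsFold_keys _ _ _ (PySem.Dict.contains_insert_self d r []),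
    PySem.Dict.keys_insert_of_not_contains _ _ h]

theorem routeStepA_getD_self (vals : List (List String)) (d : PySem.Dict String (List String)) (r : String) :
    (routeStepA vals d r).getD r [] = valR vals r := by
  unfold routeStepA valR
  rw [valsFold_getD, if_pos rfl, PySem.Dict.getD_insert_self]

theorem routeStepA_getD_ne (vals : List (List String)) (d : PySem.Dict String (List String)) (r k : String)
    (h : k ≠ r) : (routeStepA vals d r).getD k [] = d.getD k [] := by
  unfold routeStepA
  rw [valsFold_getD, if_neg h, PySem.Dict.getD_insert_of_ne _ _ _ h]

theorem foldA_getD (vals : List (List String)) (ks : List String)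
    (d : PySem.Dict String (List String)) (r : String) (hnd : ks.Nodup) :
    (ks.foldl (routeStepA vals) d).getD r [] =
      if r ∈ ks then valR vals r else d.getD r [] := by
  induction ks generalizing d with
  | nil => simp
  | cons k t ih =>
    have hnd' := (List.nodup_cons.mp hnd).2
    have hknt := (List.nodup_cons.mp hnd).1
    simp only [List.foldl_cons]
    rw [ih _ hnd']
    by_cases hr : r = k
    · subst hr
      rw [if_pos (List.mem_cons_self), if_neg hknt, routeStepA_getD_self]
    · by_cases hrt : r ∈ t
      · simp [hrt]
      · rw [if_neg hrt, if_neg (by simp [hr, hrt]), routeStepA_getD_ne vals d k r hr]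

theorem foldA_keys (vals : List (List String)) (ks : List String)
    (d : PySem.Dict String (List String)) (hnd : ks.Nodup)
    (hfresh : ∀ k ∈ ks, d.contains k = false) :
    (ks.foldl (routeStepA vals) d).keys = d.keys ++ ks := by
  induction ks generalizing d with
  | nil => simp
  | cons k t ih =>
    have hnd' := (List.nodup_cons.mp hnd).2
    have hknt := (List.nodup_cons.mp hnd).1
    simp only [List.foldl_cons]
    have hkeys := routeStepA_keys vals d k (hfresh k List.mem_cons_self)
    rw [ih _ hnd' ?_, hkeys]
    · simp
    · intro x hx
      rw [PySem.Dict.contains_eq_decide_mem_keys, hkeys]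
      have hxd : x ∉ d.keys := by
        intro hmem
        exact absurd ((PySem.Dict.contains_iff_mem_keys d x).mpr hmem)
          (by simp [hfresh x (List.mem_cons_of_mem _ hx)])
      have hxk : x ≠ k := fun he => hknt (he ▸ hx)
      simp [hxd, hxk]

-- === B side, stage 1: the collected index ===

-- inner loop over the distinct members of one list
theorem getD_memberFold (lst ms : List String) (d : PySem.Dict String (List String)) (r : String)
    (hnd : ms.Nodup) :
    (ms.foldl (fun d member => d.modify member [] (· ++ lst)) d).getD r [] =
      d.getD r [] ++ (if r ∈ ms then lst else []) := by
  induction ms generalizing d with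
  | nil => simp
  | cons m t ih =>
    have hnd' := (List.nodup_cons.mp hnd).2
    have hmnt := (List.nodup_cons.mp hnd).1
    simp only [List.foldl_cons]
    rw [ih _ hnd']
    by_cases hr : r = m
    · subst hr
      rw [if_neg hmnt, if_pos List.mem_cons_self, PySem.Dict.getD_modify_self, List.append_nil]
    · rw [PySem.Dict.getD_modify_of_ne _ _ _ hr]
      by_cases hrt : r ∈ t <;> simp [hr, hrt]

def collStep (d : PySem.Dict String (List String)) (lst : List String) :
    PySem.Dict String (List String) :=
  (PySem.List.dedup lst).foldl (fun d member => d.modify member [] (· ++ lst)) d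

theorem collStep_getD (lst : List String) (d : PySem.Dict String (List String)) (r : String) :
    (collStep d lst).getD r [] = d.getD r [] ++ (if lst.contains r then lst else []) := by
  unfold collStep
  rw [getD_memberFold lst _ d r (PySem.List.nodup_dedup lst)]
  by_cases hr : r ∈ lst
  · rw [if_pos ((PySem.List.mem_dedup lst r).mpr hr), if_pos (by simpa [List.contains_eq_mem] using hr)]
  · rw [if_neg (fun h => hr ((PySem.List.mem_dedup lst r).mp h)),
      if_neg (by simpa [List.contains_eq_mem] using hr)]

theorem collFold_getD (vals : List (List String)) (d : PySem.Dict String (List String)) (r : String) :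
    (vals.foldl collStep d).getD r [] =
      d.getD r [] ++ (vals.filter (fun l => l.contains r)).flatten := by
  induction vals generalizing d with
  | nil => simp
  | cons v t ih =>
    simp only [List.foldl_cons, List.filter_cons]
    rw [ih, collStep_getD]
    simp only [List.contains_eq_mem] at *
    by_cases hv : r ∈ v
    · simp [hv]
    · simp [hv]

-- === B side, stage 2: dedup/filter versus A's addAll ===

-- ordered dedup starting from an accumulator (PySem.List.dedup lst = dedupFrom [] lst)
def dedupFrom (acc lst : List String) : List String := lst.foldl PySem.Set.add acc

theorem dedup_eq_dedupFrom (lst : List String) : PySem.List.dedup lst = dedupFrom [] lst := rfl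

-- A's guarded append IS dedup of the list with r filtered out
theorem addAll_eq_dedupFrom_filter (r : String) (acc lst : List String) :
    addAll r acc lst = dedupFrom acc (lst.filter (fun s => s != r)) := by
  induction lst generalizing acc with
  | nil => rfl
  | cons s t ih =>
    rw [addAll_cons, List.filter_cons]
    by_cases hs : s = r
    · subst hs
      simp only [bne_self_eq_false, Bool.false_and, Bool.false_eq_true, if_false]
      exact ih acc
    · have hbs : (s != r) = true := by simp [bne, hs]
      simp only [hbs, Bool.true_and, if_true]
      rw [ih]
      unfold dedupFrom
      simp only [List.foldl_cons]
      congr 1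
      unfold PySem.Set.add
      simp

-- filtering commutes with ordered dedup
theorem filter_dedupFrom (p : String → Bool) (acc lst : List String) :
    (dedupFrom acc lst).filter p = dedupFrom (acc.filter p) (lst.filter p) := by
  induction lst generalizing acc with
  | nil => rfl
  | cons s t ih =>
    unfold dedupFrom
    simp only [List.foldl_cons, List.filter_cons]
    by_cases hp : p s = true
    · simp only [hp, if_true]
      show (dedupFrom (PySem.Set.add acc s) t).filter p = dedupFrom (PySem.Set.add (acc.filter p) s) (t.filter p)
      rw [ih]
      congr 1
      unfold PySem.Set.add
      by_cases hc : s ∈ acc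
      · rw [if_pos (by simpa [List.contains_eq_mem] using hc),
          if_pos (by simp [List.contains_eq_mem, List.mem_filter, hc, hp])]
      · rw [if_neg (by simpa [List.contains_eq_mem] using hc),
          if_neg (by simp [List.contains_eq_mem, List.mem_filter, hc]),
          List.filter_append]
        simp [hp]
    · simp only [Bool.not_eq_true] at hp
      simp only [hp, Bool.false_eq_true, if_false]
      show (dedupFrom (PySem.Set.add acc s) t).filter p = dedupFrom (acc.filter p) (t.filter p)
      rw [ih]
      congr 1
      unfold PySem.Set.add
      split
      · rfl
      · rw [List.filter_append]
        simp [hp]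

-- A's bucket value as addAll over the concatenation of the lists containing r
theorem valR_eq_addAll_flatten (vals : List (List String)) (r : String) :
    valR vals r = addAll r [] (vals.filter (fun l => l.contains r)).flatten := by
  unfold valR
  have h : ∀ acc, vals.foldl (fun acc lst => if lst.contains r then addAll r acc lst else acc) acc =
      addAll r acc (vals.filter (fun l => l.contains r)).flatten := by
    intro acc
    induction vals generalizing acc with
    | nil => rfl
    | cons v t ih =>
      simp only [List.foldl_cons, List.filter_cons]
      by_cases hv : v.contains r = true
      · simp only [hv, if_true, List.flatten_cons]
        rw [ih, addAll_append]
      · simp only [Bool.not_eq_true] at hv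
        simp only [hv, Bool.false_eq_true, if_false]
        exact ih acc
  exact h []

-- B's per-route value equals A's
theorem bval_eq_valR (vals : List (List String)) (r : String) :
    (PySem.List.dedup ((vals.filter (fun l => l.contains r)).flatten)).filter (fun s => s != r) =
      valR vals r := by
  rw [dedup_eq_dedupFrom, filter_dedupFrom, valR_eq_addAll_flatten, addAll_eq_dedupFrom_filter]
  rfl

-- === B side, stage 2: the output dict built by fresh inserts ===

theorem outFold_getD_not_mem (g : String → List String) (ks : List String)
    (d : PySem.Dict String (List String)) (r : String) (h : r ∉ ks) :
    (ks.foldl (fun d k => d.insert k (g k)) d).getD r [] = d.getD r [] := by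
  induction ks generalizing d with
  | nil => rfl
  | cons k t ih =>
    simp only [List.foldl_cons]
    rw [ih _ (fun hx => h (List.mem_cons_of_mem _ hx)),
      PySem.Dict.getD_insert_of_ne _ _ _ (fun he => h (by rw [he]; exact List.mem_cons_self))]

theorem outFold_getD_mem (g : String → List String) (ks : List String)
    (d : PySem.Dict String (List String)) (r : String) (hnd : ks.Nodup) (h : r ∈ ks) :
    (ks.foldl (fun d k => d.insert k (g k)) d).getD r [] = g r := by
  induction ks generalizing d with
  | nil => cases h
  | cons k t ih =>
    have hnd' := (List.nodup_cons.mp hnd).2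
    have hknt := (List.nodup_cons.mp hnd).1
    simp only [List.foldl_cons]
    by_cases hr : r = k
    · subst hr
      rw [outFold_getD_not_mem _ _ _ _ hknt, PySem.Dict.getD_insert_self]
    · exact ih _ hnd' ((List.mem_cons.mp h).resolve_left hr)

theorem outFold_keys (g : String → List String) (ks : List String)
    (d : PySem.Dict String (List String)) (hnd : ks.Nodup)
    (hfresh : ∀ k ∈ ks, d.contains k = false) :
    (ks.foldl (fun d k => d.insert k (g k)) d).keys = d.keys ++ ks := by
  induction ks generalizing d with
  | nil => simp
  | cons k t ih =>
    have hnd' := (List.nodup_cons.mp hnd).2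
    have hknt := (List.nodup_cons.mp hnd).1
    simp only [List.foldl_cons]
    have hkeys := PySem.Dict.keys_insert_of_not_contains d (g k) (hfresh k List.mem_cons_self)
    rw [ih _ hnd' ?_, hkeys]
    · simp
    · intro x hx
      rw [PySem.Dict.contains_eq_decide_mem_keys, hkeys]
      have hxd : x ∉ d.keys := by
        intro hmem
        exact absurd ((PySem.Dict.contains_iff_mem_keys d x).mpr hmem)
          (by simp [hfresh x (List.mem_cons_of_mem _ hx)])
      have hxk : x ≠ k := fun he => hknt (he ▸ hx)
      simp [hxd, hxk]

-- ===== VERDICT (by name: the statement is the Claim_ definition above) =====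
theorem get_line_dict_spec : Claim_equal_get_line_dict := by
  unfold Claim_equal_get_line_dict Spec_get_line_dict
  intro cs rs _
  unfold get_line_dict get_line_dict_alt
  simp only []
  set csD := PySem.Dict.ofList cs with hcs
  set rsD := PySem.Dict.ofList rs with hrs
  have hnd : rsD.keys.Nodup := PySem.Dict.nodup_keys_ofList rs
  -- A's dict
  set dA := rsD.keys.foldl (routeStepA csD.values) PySem.Dict.empty with hdA
  have hAkeys : dA.keys = rsD.keys := by
    rw [hdA, foldA_keys _ _ _ hnd (fun k _ => PySem.Dict.contains_empty k), PySem.Dict.keys_empty,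
      List.nil_append]
  -- B's collected index
  set coll := csD.values.foldl collStep PySem.Dict.empty with hcoll
  have hcollg : ∀ r, coll.getD r [] = (csD.values.filter (fun l => l.contains r)).flatten := by
    intro r
    rw [hcoll, collFold_getD, PySem.Dict.getD_empty, List.nil_append]
  -- B's output dict
  set g : String → List String :=
    fun rid => (PySem.List.dedup (coll.getD rid [])).filter (fun s => s != rid) with hg
  set dB := rsD.keys.foldl (fun out rid => out.insert rid (g rid)) PySem.Dict.empty with hdB
  have hBkeys : dB.keys = rsD.keys := by
    rw [hdB, outFold_keys _ _ _ hnd (fun k _ => PySem.Dict.contains_empty k), PySem.Dict.keys_empty,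
      List.nil_append]
  have hAnd : dA.keys.Nodup := by rw [hAkeys]; exact hnd
  have hBnd : dB.keys.Nodup := by rw [hBkeys]; exact hnd
  show dA.items = dB.items
  rw [PySem.Dict.items_eq_map_keys dA hAnd ([] : List String),
    PySem.Dict.items_eq_map_keys dB hBnd ([] : List String), hAkeys, hBkeys]
  apply List.map_congr_left
  intro r hr
  have hgA : dA.getD r [] = valR csD.values r := by
    rw [hdA, foldA_getD _ _ _ _ hnd, if_pos hr]
  have hgB : dB.getD r [] = valR csD.values r := by
    rw [hdB, outFold_getD_mem _ _ _ _ hnd hr, hg]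
    simp only []
    rw [hcollg r, bval_eq_valR]
  rw [hgA, hgB]
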